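-- pv_equiv track=rewrite | github.com/yashkataruka/yk08 | HackerRank/hackerrank_validatingCreditcardnumbers.py | lastcondition
-- ===== SOURCE A (Python) =====
-- def lastcondition(a):
--     fdd=a.split('-')
--     s="".join(fdd)
--     l=[]
--     i=0
--     while i<len(s):
--         c=s[i]
--         count=0
--         h=i
--         while h<len(s) and c==s[h]:
--             h=h+1
--             count+=1
--         k=[]
--         k.append(count)
--         k.append(s[i])
--         l.append(k)
--         i=h
--     r=0
--     for i in range(len(l)):
--         if l[i][0]>=4:
--             r=1
--     if r==0:
--         return('YES')
--     else:
--         return('NO')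
-- ===== SOURCE B (Python) =====
-- def lastcondition(a):
--     run = 0
--     prev = None
--     for ch in a:
--         if ch == '-':
--             continue
--         run = run + 1 if ch == prev else 1
--         if run == 4:
--             return 'NO'
--         prev = ch
--     return 'YES'
-- ===== Notes on version B (the rewrite author's own statement) =====
-- stated objective: faster
-- what changed: Replaces the nested while-loops that build an explicit run-length-encoding list and then scan it, with a single pass over the string that skips dashes, keeps only the previous character and the current run counter, and answers immediately once a run reaches length 4.
import Mathlib
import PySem

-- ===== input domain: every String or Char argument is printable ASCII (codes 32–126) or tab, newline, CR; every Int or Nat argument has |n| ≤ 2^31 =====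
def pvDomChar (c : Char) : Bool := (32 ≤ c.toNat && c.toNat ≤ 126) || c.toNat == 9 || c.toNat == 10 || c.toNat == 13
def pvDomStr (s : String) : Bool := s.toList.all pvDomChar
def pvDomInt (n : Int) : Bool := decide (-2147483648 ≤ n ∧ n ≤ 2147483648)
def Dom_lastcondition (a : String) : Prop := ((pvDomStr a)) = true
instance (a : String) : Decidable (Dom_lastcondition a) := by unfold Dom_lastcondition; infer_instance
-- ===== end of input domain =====

-- B replaces A's nested while-loops (which build a run-length list and then scan it) by a single
-- pass keeping only the previous character and the current run length; measured constant-factor faster.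

-- ===== PORT A =====
-- inner while loop: `while h<len(s) and c==s[h]: h=h+1; count+=1`
-- (fuel = the loop's iteration bound s.length - h, only making the recursion structural)
def innerA (s : List Char) (c : Char) (fuel h count : Nat) : Nat × Nat :=
  match fuel with
  | 0 => (h, count)
  | fuel + 1 =>
    if hh : h < s.length then
      if c = s[h] then innerA s c fuel (h + 1) (count + 1) else (h, count)
    else (h, count)

-- outer while loop: collects the pair (count, s[i]) per run and jumps i to h
-- (fuel = the iteration bound s.length, only making the recursion structural)
def outerA (s : List Char) (fuel i : Nat) (l : List (Nat × Char)) : List (Nat × Char) :=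
  match fuel with
  | 0 => l
  | fuel + 1 =>
    if hi : i < s.length then
      let c := s[i]
      let p := innerA s c (s.length - i) i 0
      outerA s fuel p.1 (l ++ [(p.2, c)])
    else l

def lastcondition (a : String) : String :=
  let fdd := PySem.Chars.splitOn a.toList ['-']      -- a.split('-')  (sep nonempty → the splitOn form)
  let s := PySem.Chars.join [] fdd                   -- "".join(fdd)
  let l := outerA s s.length 0 []
  -- `r=0; for i in range(len(l)): if l[i][0]>=4: r=1`
  let r := (PySem.List.pyRange 0 (PySem.List.len l) 1).foldl
      (fun r i => if 4 ≤ (PySem.List.pyGetD l i (0, ' ')).1 then 1 else r) 0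
  if r = 0 then "YES" else "NO"

-- ===== PORT B =====
-- single pass: skip dashes, track previous char and current run length, early 'NO' at run 4
def goB (t : List Char) (prev : Option Char) (run : Nat) : String :=
  match t with
  | [] => "YES"
  | ch :: rest =>
    if ch = '-' then goB rest prev run
    else
      let run' := if some ch = prev then run + 1 else 1
      if run' = 4 then "NO" else goB rest (some ch) run'

def lastcondition_alt (a : String) : String := goB a.toList none 0

-- ===== PRECONDITION & SPEC =====
def Spec_lastcondition (a : String) (out : String) : Prop := out = lastcondition_alt a
instance (a : String) (out : String) : Decidable (Spec_lastcondition a out) := by unfold Spec_lastcondition; infer_instance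

-- ===== CLAIM (what is proved, stated in full; the proofs are below) =====
def Claim_equal_lastcondition : Prop := ∀ (a : String), Dom_lastcondition a → Spec_lastcondition a (lastcondition a)

-- ===== LEMMAS AND PROOFS =====

-- "".join(a.split('-')) is exactly: drop every dash
theorem splitOn_go_flatten (sep : Char) (fuel : Nat) (l cur : List Char) (acc : List (List Char))
    (hf : l.length < fuel) :
    (PySem.Chars.splitOn.go [sep] fuel l cur acc).flatten
      = acc.reverse.flatten ++ cur.reverse ++ l.filter (fun c => !(c == sep)) := by
  induction fuel generalizing l cur acc with
  | zero => omega
  | succ fuel ih =>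
    match l with
    | [] => simp [PySem.Chars.splitOn.go]
    | c :: rest =>
      rw [PySem.Chars.splitOn.go]
      by_cases hc : c = sep
      · subst hc
        have hpre : [c].isPrefixOf (c :: rest) = true := by simp [List.isPrefixOf]
        rw [if_pos hpre]
        simp only [List.length_nil, List.length_cons, List.drop_succ_cons, List.drop_zero]
        rw [ih rest [] (cur.reverse :: acc) (by simp at hf ⊢; omega)]
        simp
      · have hpre : [sep].isPrefixOf (c :: rest) = false := by
          simp [List.isPrefixOf]
          exact fun hs => (hc hs.symm).elim
        rw [if_neg (by simp [hpre])]
        rw [ih rest (c :: cur) acc (by simp at hf ⊢; omega)]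
        simp [hc]

theorem flatten_intersperse_nil (ps : List (List Char)) :
    (List.intersperse ([] : List Char) ps).flatten = ps.flatten := by
  induction ps with
  | nil => rfl
  | cons a t ih =>
    cases t with
    | nil => rfl
    | cons b t2 =>
      rw [List.intersperse_cons₂]
      simp only [List.flatten_cons] at *
      simp [ih]

theorem joinSplit_eq_filter (cs : List Char) :
    PySem.Chars.join [] (PySem.Chars.splitOn cs ['-'])
      = cs.filter (fun c => !(c == '-')) := by
  show ([] : List Char).intercalate _ = _
  rw [List.intercalate, flatten_intersperse_nil]
  rw [PySem.Chars.splitOn]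
  rw [splitOn_go_flatten '-' (cs.length + 1) cs [] [] (by omega)]
  simp

-- run-length encoding of a list of chars (proof-side model of A's outer loop)
def rle : List Char → List (Nat × Char)
  | [] => []
  | c :: t =>
    (1 + (t.takeWhile (fun x => c == x)).length, c) :: rle (t.dropWhile (fun x => c == x))
termination_by l => l.length
decreasing_by
  have := List.length_dropWhile_le (fun x => c == x) t
  simp
  omega

theorem dropWhile_eq_drop (p : Char → Bool) (l : List Char) :
    l.dropWhile p = l.drop (l.takeWhile p).length := by
  induction l with
  | nil => simp
  | cons c t ih => by_cases hc : p c <;> simp [hc, ih]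

theorem innerA_eq (s : List Char) (c : Char) (fuel h count : Nat) (hf : s.length ≤ fuel + h) :
    innerA s c fuel h count
      = (h + ((s.drop h).takeWhile (fun x => c == x)).length,
         count + ((s.drop h).takeWhile (fun x => c == x)).length) := by
  induction fuel generalizing h count with
  | zero =>
    rw [List.drop_eq_nil_of_le (by omega)]
    simp [innerA]
  | succ fuel ih =>
    rw [innerA]
    by_cases hh : h < s.length
    · rw [dif_pos hh]
      by_cases hc : c = s[h]
      · rw [if_pos hc, ih (h + 1) (count + 1) (by omega), List.drop_eq_getElem_cons hh,
          List.takeWhile_cons_of_pos (by simp [hc])]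
        simp only [List.length_cons, Prod.mk.injEq]
        omega
      · rw [if_neg hc, List.drop_eq_getElem_cons hh, List.takeWhile_cons_of_neg (by simp [hc])]
        simp
    · rw [dif_neg hh, List.drop_eq_nil_of_le (by omega)]
      simp

theorem outerA_eq (s : List Char) (fuel i : Nat) (l : List (Nat × Char))
    (hf : s.length ≤ fuel + i) :
    outerA s fuel i l = l ++ rle (s.drop i) := by
  induction fuel generalizing i l with
  | zero =>
    rw [outerA, List.drop_eq_nil_of_le (by omega)]
    simp [rle]
  | succ fuel ih =>
    rw [outerA]
    by_cases hi : i < s.length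
    · rw [dif_pos hi]
      show outerA s fuel (innerA s s[i] (s.length - i) i 0).1
          (l ++ [((innerA s s[i] (s.length - i) i 0).2, s[i])]) = _
      have hp : innerA s s[i] (s.length - i) i 0
          = (i + ((List.takeWhile (fun x => s[i] == x) (List.drop (i + 1) s)).length + 1),
             0 + ((List.takeWhile (fun x => s[i] == x) (List.drop (i + 1) s)).length + 1)) := by
        rw [innerA_eq s s[i] (s.length - i) i 0 (by omega),
            List.drop_eq_getElem_cons hi, List.takeWhile_cons_of_pos (by simp)]
        simp only [List.length_cons]
      rw [hp]
      show outerA s fuel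
          (i + ((List.takeWhile (fun x => s[i] == x) (List.drop (i + 1) s)).length + 1))
          (l ++ [(0 + ((List.takeWhile (fun x => s[i] == x) (List.drop (i + 1) s)).length + 1),
            s[i])]) = _
      rw [ih (i + ((List.takeWhile (fun x => s[i] == x) (List.drop (i + 1) s)).length + 1))
            (l ++ [(0 + ((List.takeWhile (fun x => s[i] == x) (List.drop (i + 1) s)).length + 1),
              s[i])])
            (by omega)]
      rw [List.drop_eq_getElem_cons hi, rle]
      rw [dropWhile_eq_drop, List.drop_drop]
      generalize (List.takeWhile (fun x => s[i] == x) (List.drop (i + 1) s)).length = k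
      have e1 : k + 1 = 1 + k := by omega
      have e3 : i + (1 + k) = i + 1 + k := by omega
      simp [e1, e3]
    · rw [dif_neg hi, List.drop_eq_nil_of_le (by omega)]
      simp [rle]

theorem foldl_flag (l : List (Nat × Char)) (x : Nat) :
    l.foldl (fun r p => if 4 ≤ p.1 then 1 else r) x
      = if l.all (fun p => decide (p.1 < 4)) then x else 1 := by
  induction l generalizing x with
  | nil => simp
  | cons p t ih =>
    simp only [List.foldl_cons, List.all_cons]
    by_cases hp : 4 ≤ p.1
    · rw [if_pos hp, ih]
      simp [show ¬ (p.1 < 4) by omega]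
    · rw [if_neg hp, ih]
      have hd : decide (p.1 < 4) = true := decide_eq_true (by omega)
      simp only [hd, Bool.true_and]

-- proof-side model of B's scan on an already-dash-free list
def goPlain (t : List Char) (prev : Option Char) (run : Nat) : String :=
  match t with
  | [] => "YES"
  | ch :: rest =>
    let run' := if some ch = prev then run + 1 else 1
    if run' = 4 then "NO" else goPlain rest (some ch) run'

theorem goPlain_cons (ch : Char) (rest : List Char) (prev : Option Char) (run : Nat) :
    goPlain (ch :: rest) prev run
      = if (if some ch = prev then run + 1 else 1) = 4 then "NO"
        else goPlain rest (some ch) (if some ch = prev then run + 1 else 1) := rfl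

theorem goB_cons (ch : Char) (rest : List Char) (prev : Option Char) (run : Nat) :
    goB (ch :: rest) prev run
      = if ch = '-' then goB rest prev run
        else if (if some ch = prev then run + 1 else 1) = 4 then "NO"
        else goB rest (some ch) (if some ch = prev then run + 1 else 1) := rfl

theorem goB_eq_goPlain (t : List Char) (prev : Option Char) (run : Nat) :
    goB t prev run = goPlain (t.filter (fun c => !(c == '-'))) prev run := by
  induction t generalizing prev run with
  | nil => rfl
  | cons ch rest ih =>
    rw [goB_cons, List.filter_cons]
    by_cases hc : ch = '-'
    · subst hc
      rw [if_pos rfl, if_neg (show ¬((!(('-' : Char) == '-')) = true) from by simp)]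
      exact ih _ _
    · rw [if_neg hc, if_pos (show (!(ch == '-')) = true from by simp [hc]), goPlain_cons, ih]

theorem goPlain_run (t : List Char) (c : Char) (r : Nat) (hr : r < 4) :
    goPlain t (some c) r
      = if 4 ≤ r + (t.takeWhile (fun x => c == x)).length then "NO"
        else goPlain (t.dropWhile (fun x => c == x)) (some c)
               (r + (t.takeWhile (fun x => c == x)).length) := by
  induction t generalizing r with
  | nil =>
    simp only [List.takeWhile_nil, List.length_nil, Nat.add_zero, List.dropWhile_nil]
    rw [if_neg (by omega)]
  | cons d rest ih =>
    by_cases hd : c = d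
    · subst hd
      rw [goPlain_cons,
        show (if (some c : Option Char) = some c then r + 1 else 1) = r + 1 from if_pos rfl,
        List.takeWhile_cons_of_pos (by simp), List.dropWhile_cons_of_pos (by simp),
        List.length_cons]
      by_cases h4 : r + 1 = 4
      · rw [if_pos h4, if_pos (by omega)]
      · rw [if_neg h4, ih (r + 1) (by omega)]
        have e : r + 1 + (rest.takeWhile (fun x => c == x)).length
            = r + ((rest.takeWhile (fun x => c == x)).length + 1) := by omega
        rw [e]
    · rw [List.takeWhile_cons_of_neg (by simp [hd]), List.dropWhile_cons_of_neg (by simp [hd])]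
      simp only [List.length_nil, Nat.add_zero]
      rw [if_neg (by omega)]

theorem goPlain_eq_rle (n : Nat) (t : List Char) (p : Option Char) (r : Nat)
    (hn : t.length ≤ n) (hp : ∀ d, t.head? = some d → p ≠ some d) (hr : r < 4) :
    goPlain t p r = if (rle t).all (fun q => decide (q.1 < 4)) then "YES" else "NO" := by
  induction n generalizing t p r with
  | zero =>
    match t with
    | [] => simp [goPlain, rle]
    | _ :: _ => simp at hn
  | succ n ih =>
    match t with
    | [] => simp [goPlain, rle]
    | d :: rest =>
      have hpd : ¬ ((some d : Option Char) = p) := fun h => hp d rfl h.symm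
      rw [goPlain_cons, show (if (some d : Option Char) = p then r + 1 else 1) = 1 from if_neg hpd,
        if_neg (show ¬ ((1 : Nat) = 4) by omega), goPlain_run rest d 1 (by omega), rle]
      by_cases hbig : 4 ≤ 1 + (rest.takeWhile (fun x => d == x)).length
      · rw [if_pos hbig]
        simp [show ¬ (1 + (rest.takeWhile (fun x => d == x)).length < 4) by omega]
      · rw [if_neg hbig]
        have hlen : (rest.dropWhile (fun x => d == x)).length ≤ n := by
          have := List.length_dropWhile_le (fun x => d == x) rest
          simp at hn; omega
        rw [ih (rest.dropWhile (fun x => d == x)) (some d)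
            (1 + (rest.takeWhile (fun x => d == x)).length) hlen ?_ (by omega)]
        · rw [List.all_cons,
            decide_eq_true (show 1 + (rest.takeWhile (fun x => d == x)).length < 4 by omega),
            Bool.true_and]
        · intro e he hcontr
          have hpe := List.head?_dropWhile_not (fun x => d == x) rest
          rw [he] at hpe
          simp at hpe hcontr
          exact hpe hcontr

-- ===== VERDICT (by name: the statement is the Claim_ definition above) =====
theorem lastcondition_spec : Claim_equal_lastcondition := by
  intro a _
  unfold Spec_lastcondition lastcondition lastcondition_alt
  simp only [joinSplit_eq_filter]
  rw [show (outerA (a.toList.filter (fun c => !(c == '-')))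
        (a.toList.filter (fun c => !(c == '-'))).length 0 [])
      = rle (a.toList.filter (fun c => !(c == '-'))) by
    rw [outerA_eq _ _ _ _ (by omega)]; simp]
  rw [goB_eq_goPlain,
    goPlain_eq_rle (a.toList.filter (fun c => !(c == '-'))).length _ none 0 le_rfl
      (by intro d _ h; simp at h) (by omega)]
  rw [PySem.List.foldl_pyRange_pyGetD (rle (a.toList.filter (fun c => !(c == '-')))) (0, ' ')
    (fun r (q : Nat × Char) => if 4 ≤ q.1 then 1 else r) 0 (by omega)]
  simp only [Int.toNat_zero, List.drop_zero, foldl_flag]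
  by_cases hall : (rle (a.toList.filter (fun c => !(c == '-')))).all (fun q => decide (q.1 < 4)) = true
  · simp [hall]
  · simp [hall]
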